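-- pv_equiv track=rewrite | github.com/JesIriz/Advent-of-code-2023 | part 5/Ej 5-2 (WIP).py | seeds_as_ranges_calculation
-- ===== SOURCE A (Python) =====
-- def seeds_as_ranges_calculation(seeds_to_map):
--     calculated_seeds = []
--     range_start = 0
--     for index, seed in enumerate(seeds_to_map):
--         if index % 2 == 0:
--             range_start = int(seed)
--         else:
--             calculated_seeds.append((range_start, range_start + int(seed) - 1))
--
--     return calculated_seeds
-- ===== SOURCE B (Python) =====
-- def seeds_as_ranges_calculation(seeds_to_map):
--     # Divide and conquer: split at an even midpoint, solve halves, concatenate.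
--     n = len(seeds_to_map)
--     if n < 2:
--         return []
--     if n < 4:
--         start, length = seeds_to_map[0], seeds_to_map[1]
--         return [(int(start), int(start) + int(length) - 1)]
--     mid = 2 * (n // 4)
--     return (seeds_as_ranges_calculation(seeds_to_map[:mid])
--             + seeds_as_ranges_calculation(seeds_to_map[mid:]))
-- ===== Notes on version B (the rewrite author's own statement) =====
-- stated objective: alternative
-- what changed: Replaces the stateful index-parity loop (carried range_start, index % 2 branch) by divide-and-conquer recursion: split the list at an even midpoint, solve both halves independently, and concatenate the results; correct because pairing distributes over a split at an even index.
import Mathlib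
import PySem

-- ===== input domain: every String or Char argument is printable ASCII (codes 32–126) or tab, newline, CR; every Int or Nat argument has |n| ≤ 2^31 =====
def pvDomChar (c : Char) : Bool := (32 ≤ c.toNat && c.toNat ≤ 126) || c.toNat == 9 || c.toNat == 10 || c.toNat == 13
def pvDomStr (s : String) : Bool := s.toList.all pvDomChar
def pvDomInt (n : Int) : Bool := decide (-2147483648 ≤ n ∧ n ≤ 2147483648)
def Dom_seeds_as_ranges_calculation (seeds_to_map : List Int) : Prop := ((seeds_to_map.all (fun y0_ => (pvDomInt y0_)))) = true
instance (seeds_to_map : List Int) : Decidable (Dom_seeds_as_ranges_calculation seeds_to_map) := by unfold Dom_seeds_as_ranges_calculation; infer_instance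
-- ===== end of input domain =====

-- B replaces A's stateful index-parity loop by divide-and-conquer: split at an even midpoint, solve halves, concatenate.

-- ===== PORT A =====
-- loop body: even index stores range_start, odd index appends (range_start, range_start + seed - 1)
def pvStepA (st : List (Int × Int) × Int) (p : Int × Int) : List (Int × Int) × Int :=
  if PySem.Int.mod p.1 2 == 0 then (st.1, p.2)
  else (st.1 ++ [(st.2, st.2 + p.2 - 1)], st.2)

def seeds_as_ranges_calculation (seeds_to_map : List Int) : List (Int × Int) :=
  (List.foldl pvStepA ([], 0) (PySem.List.enumerate seeds_to_map 0)).1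

-- ===== PORT B =====
-- Source B: n < 2 → []; n < 4 → single pair from seeds[0], seeds[1]; else split at mid = 2*(n//4) and recurse on both halves
def seeds_as_ranges_calculation_alt (xs : List Int) : List (Int × Int) :=
  let n := xs.length
  if n < 2 then []
  else if n < 4 then
    [(xs.getD 0 0, xs.getD 0 0 + xs.getD 1 0 - 1)]
  else
    seeds_as_ranges_calculation_alt (xs.take (2 * (n / 4)))
      ++ seeds_as_ranges_calculation_alt (xs.drop (2 * (n / 4)))
termination_by xs.length
decreasing_by
  · simp only [List.length_take]; omega
  · simp only [List.length_drop]; omega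

-- ===== PRECONDITION & SPEC =====
def Spec_seeds_as_ranges_calculation (seeds_to_map : List Int) (out : List (Int × Int)) : Prop := out = seeds_as_ranges_calculation_alt seeds_to_map
instance (seeds_to_map : List Int) (out : List (Int × Int)) : Decidable (Spec_seeds_as_ranges_calculation seeds_to_map out) := by unfold Spec_seeds_as_ranges_calculation; infer_instance

-- ===== CLAIM =====
def Claim_equal_seeds_as_ranges_calculation : Prop := ∀ (seeds_to_map : List Int), Dom_seeds_as_ranges_calculation seeds_to_map → Spec_seeds_as_ranges_calculation seeds_to_map (seeds_as_ranges_calculation seeds_to_map)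

-- ===== LEMMAS AND PROOFS =====
-- reference pairing recursion, used only in the proofs
def pvPairRec : List Int → List (Int × Int)
  | a :: b :: rest => (a, a + b - 1) :: pvPairRec rest
  | _ => []

theorem pvPairRec_append : ∀ (u v : List Int), u.length % 2 = 0 →
    pvPairRec (u ++ v) = pvPairRec u ++ pvPairRec v
  | [], v, _ => by simp [pvPairRec]
  | [a], v, h => by simp at h
  | a :: b :: r, v, h => by
      have hr : r.length % 2 = 0 := by simp at h; omega
      simp only [List.cons_append, pvPairRec, pvPairRec_append r v hr]

theorem pvAlt_eq_pairRec (xs : List Int) : seeds_as_ranges_calculation_alt xs = pvPairRec xs := by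
  induction hn : xs.length using Nat.strong_induction_on generalizing xs with
  | _ n ih =>
    subst hn
    unfold seeds_as_ranges_calculation_alt
    by_cases h2 : xs.length < 2
    · simp only [h2, if_true]
      match xs, h2 with
      | [], _ => rfl
      | [a], _ => rfl
    · by_cases h4 : xs.length < 4
      · simp only [h2, h4, if_false, if_true]
        match xs, h2, h4 with
        | [], h, _ => simp at h
        | [a], h, _ => simp at h
        | a :: b :: [], _, _ => simp [pvPairRec]
        | a :: b :: c :: [], _, _ => simp [pvPairRec]
        | a :: b :: c :: d :: r, _, h => simp at h; omega
      · simp only [h2, h4, if_false]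
        have hmid : 2 * (xs.length / 4) ≤ xs.length := by omega
        have htl : (xs.take (2 * (xs.length / 4))).length = 2 * (xs.length / 4) := by
          simp [List.length_take]; omega
        have hdl : (xs.drop (2 * (xs.length / 4))).length = xs.length - 2 * (xs.length / 4) := by
          simp [List.length_drop]
        rw [ih _ (by omega) _ htl, ih _ (by omega) _ hdl,
            ← pvPairRec_append _ _ (by rw [htl]; omega), List.take_append_drop]

theorem pvAux : ∀ (xs : List Int) (acc : List (Int × Int)) (rs : Int) (k : Nat),
    (List.foldl pvStepA (acc, rs) (PySem.List.enumerate xs (2 * (k : Int)))).1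
      = acc ++ pvPairRec xs
  | [], acc, rs, k => by
      simp [pvPairRec]
  | [a], acc, rs, k => by
      simp [PySem.List.enumerate_cons, pvPairRec, pvStepA]
  | a :: b :: rest, acc, rs, k => by
      have h0 : PySem.Int.mod (2 * (k : Int)) 2 = 0 := by
        rw [PySem.Int.mod_eq_emod_of_pos (by norm_num : (0:Int) < 2)]; omega
      have h1 : PySem.Int.mod (2 * (k : Int) + 1) 2 = 1 := by
        rw [PySem.Int.mod_eq_emod_of_pos (by norm_num : (0:Int) < 2)]; omega
      have h2 : (2 * (k : Int) + 1 + 1) = 2 * ((k + 1 : Nat) : Int) := by push_cast; ring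
      have ih := pvAux rest (acc ++ [(a, a + b - 1)]) a (k + 1)
      push_cast at ih
      simp only [PySem.List.enumerate_cons, List.foldl_cons, pvStepA, h0, h1, h2]
      simp only [pvPairRec]
      simp only [BEq.rfl, if_true]
      norm_num
      rw [ih]
      simp

-- ===== VERDICT =====
theorem seeds_as_ranges_calculation_spec : Claim_equal_seeds_as_ranges_calculation := by
  intro xs _
  unfold Spec_seeds_as_ranges_calculation seeds_as_ranges_calculation
  rw [pvAlt_eq_pairRec]
  have := pvAux xs [] 0 0
  simpa using this
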